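-- pv_equiv track=rewrite | github.com/tajo9128/BioDockify-Pharma-AI | plugins/_office/helpers/desktop_state.py | mask_shift_and_bits
-- ===== SOURCE A (Python) =====
-- def mask_shift_and_bits(mask: int) -> tuple[int, int]:
--     if mask <= 0:
--         return 0, 0
--     shift = 0
--     value = mask
--     while value and value & 1 == 0:
--         shift += 1
--         value >>= 1
--     bits = 0
--     while value & 1:
--         bits += 1
--         value >>= 1
--     return shift, bits
-- ===== SOURCE B (Python) =====
-- def mask_shift_and_bits(mask: int) -> tuple[int, int]:
--     if mask <= 0:
--         return 0, 0
--     # trailing zeros: mask ^ (mask - 1) is a block of (shift + 1) ones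
--     shift = (mask ^ (mask - 1)).bit_length() - 1
--     value = mask >> shift
--     # trailing ones of the shifted value: value ^ (value + 1) is (bits + 1) ones
--     bits = (value ^ (value + 1)).bit_length() - 1
--     return shift, bits
-- ===== Notes on version B (the rewrite author's own statement) =====
-- stated objective: idiomatic
-- what changed: Both while-loops are replaced by loop-free bit tricks: trailing zeros via (mask ^ (mask-1)).bit_length()-1 and the contiguous set-bit run via (value ^ (value+1)).bit_length()-1.
import Mathlib
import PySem

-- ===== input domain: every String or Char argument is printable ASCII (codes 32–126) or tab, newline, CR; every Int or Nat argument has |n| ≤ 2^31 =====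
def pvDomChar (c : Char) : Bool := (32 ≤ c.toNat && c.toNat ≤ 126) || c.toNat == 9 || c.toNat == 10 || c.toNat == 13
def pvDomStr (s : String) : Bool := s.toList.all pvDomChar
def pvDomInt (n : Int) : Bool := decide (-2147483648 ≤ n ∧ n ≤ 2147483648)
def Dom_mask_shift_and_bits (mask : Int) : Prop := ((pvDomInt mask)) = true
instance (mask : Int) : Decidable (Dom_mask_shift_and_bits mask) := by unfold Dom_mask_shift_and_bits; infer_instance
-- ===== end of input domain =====

-- B replaces A's two while-loops by loop-free bit tricks (x ^ (x-1) / x ^ (x+1) plus bit_length); idiomatic, same cost.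


-- ===== PORT A =====
-- `while value and value & 1 == 0: shift += 1; value >>= 1`
-- (fuel only makes the loop total; fuel = |value| + 1 always suffices for the values A's guard admits)
def loopShiftA : Nat → Int → Int → Int × Int
  | 0, shift, value => (shift, value)
  | f + 1, shift, value =>
      if value ≠ 0 ∧ Int.land value 1 = 0 then
        loopShiftA f (shift + 1) (value >>> (1 : Nat))
      else (shift, value)

-- `while value & 1: bits += 1; value >>= 1`
def loopBitsA : Nat → Int → Int → Int
  | 0, bits, _ => bits
  | f + 1, bits, value =>
      if Int.land value 1 ≠ 0 then loopBitsA f (bits + 1) (value >>> (1 : Nat))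
      else bits

def mask_shift_and_bits (mask : Int) : Int × Int :=
  if mask ≤ 0 then (0, 0)
  else
    let p := loopShiftA (mask.natAbs + 1) 0 mask
    (p.1, loopBitsA (p.2.natAbs + 1) 0 p.2)

-- ===== PORT B =====
-- Python int.bit_length (exact: bit_length of n is Nat.size |n|)
def pyBitLength (n : Int) : Int := (Nat.size n.natAbs : Int)

def mask_shift_and_bits_alt (mask : Int) : Int × Int :=
  if mask ≤ 0 then (0, 0)
  else
    let shift := pyBitLength (Int.xor mask (mask - 1)) - 1   -- (mask ^ (mask - 1)).bit_length() - 1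
    let value := mask >>> shift.toNat                        -- mask >> shift  (shift ≥ 0 here)
    let bits := pyBitLength (Int.xor value (value + 1)) - 1  -- (value ^ (value + 1)).bit_length() - 1
    (shift, bits)

-- ===== PRECONDITION & SPEC =====
def Spec_mask_shift_and_bits (mask : Int) (out : Int × Int) : Prop := out = mask_shift_and_bits_alt mask
instance (mask : Int) (out : Int × Int) : Decidable (Spec_mask_shift_and_bits mask out) := by unfold Spec_mask_shift_and_bits; infer_instance

-- ===== CLAIM (what is proved, stated in full; the proofs are below) =====
def Claim_equal_mask_shift_and_bits : Prop := ∀ (mask : Int), Dom_mask_shift_and_bits mask → Spec_mask_shift_and_bits mask (mask_shift_and_bits mask)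

-- ===== LEMMAS AND PROOFS =====

-- trailing zeros / trailing ones of a natural number
def tz (n : Nat) : Nat :=
  if n % 2 = 0 ∧ n ≠ 0 then tz (n / 2) + 1 else 0
decreasing_by exact Nat.div_lt_self (Nat.pos_of_ne_zero (by omega)) (by omega)

def tones (n : Nat) : Nat :=
  if n % 2 = 1 then tones (n / 2) + 1 else 0
decreasing_by exact Nat.div_lt_self (by omega) (by omega)

theorem xor_two_mul_add_one_left (a b : Nat) : (2 * a + 1) ^^^ (2 * b) = 2 * (a ^^^ b) + 1 := by
  have := Nat.xor_bit true a false b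
  simpa [Nat.bit, Nat.two_mul] using this

theorem xor_two_mul_left (a b : Nat) : (2 * a) ^^^ (2 * b + 1) = 2 * (a ^^^ b) + 1 := by
  have := Nat.xor_bit false a true b
  simpa [Nat.bit, Nat.two_mul] using this

theorem size_two_mul_add_one (a : Nat) : Nat.size (2 * a + 1) = Nat.size a + 1 := by
  have := Nat.size_bit (b := true) (n := a) (by simp [Nat.bit])
  simpa [Nat.bit, Nat.two_mul] using this

theorem size_ones (t : Nat) : Nat.size (2 ^ (t + 1) - 1) = t + 1 := by
  induction t with
  | zero => simp
  | succ t ih =>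
      have h : 2 ^ (t + 2) - 1 = 2 * (2 ^ (t + 1) - 1) + 1 := by
        have : 1 ≤ 2 ^ (t + 1) := Nat.one_le_two_pow
        rw [pow_succ]; omega
      rw [h, size_two_mul_add_one, ih]

-- B's first trick: n ^ (n - 1) is a block of tz n + 1 ones
theorem xor_pred (n : Nat) (h : 0 < n) : n ^^^ (n - 1) = 2 ^ (tz n + 1) - 1 := by
  induction n using Nat.strong_induction_on with
  | _ n ih =>
    rcases Nat.even_or_odd n with he | ho
    · obtain ⟨k, hk⟩ := he
      have hk2 : n = 2 * k := by omega
      subst hk2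
      have hkpos : 0 < k := by omega
      have h1 : 2 * k - 1 = 2 * (k - 1) + 1 := by omega
      have htz : tz (2 * k) = tz k + 1 := by
        rw [tz, if_pos ⟨by omega, by omega⟩]
        have : 2 * k / 2 = k := by omega
        rw [this]
      rw [h1, xor_two_mul_left, htz, ih k (by omega) hkpos]
      have : 1 ≤ 2 ^ (tz k + 1) := Nat.one_le_two_pow
      rw [pow_succ]; omega
    · obtain ⟨k, hk⟩ := ho
      subst hk
      have h1 : 2 * k + 1 - 1 = 2 * k := by omega
      have htz : tz (2 * k + 1) = 0 := by rw [tz, if_neg]; omega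
      rw [h1, xor_two_mul_add_one_left, htz]
      simp

-- B's second trick: n ^ (n + 1) is a block of tones n + 1 ones
theorem xor_succ (n : Nat) : n ^^^ (n + 1) = 2 ^ (tones n + 1) - 1 := by
  induction n using Nat.strong_induction_on with
  | _ n ih =>
    rcases Nat.even_or_odd n with he | ho
    · obtain ⟨k, hk⟩ := he
      have hk2 : n = 2 * k := by omega
      subst hk2
      have ht : tones (2 * k) = 0 := by rw [tones, if_neg]; omega
      rw [xor_two_mul_left, ht]
      simp
    · obtain ⟨k, hk⟩ := ho
      subst hk
      have h1 : 2 * k + 1 + 1 = 2 * (k + 1) := by omega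
      have ht : tones (2 * k + 1) = tones k + 1 := by
        rw [tones, if_pos (by omega)]
        have : (2 * k + 1) / 2 = k := by omega
        rw [this]
      rw [h1, xor_two_mul_add_one_left, ht, ih k (by omega)]
      have : 1 ≤ 2 ^ (tones k + 1) := Nat.one_le_two_pow
      rw [pow_succ]; omega

-- cast bridges (definitional for nonnegative operands)
theorem xor_natCast (a b : Nat) : Int.xor (a : Int) (b : Int) = ((a ^^^ b : Nat) : Int) := rfl

theorem shiftRight_natCast (a : Nat) (s : Nat) : ((a : Int) >>> s) = ((a >>> s : Nat) : Int) :=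
  (Int.natCast_shiftRight a s).symm

theorem land_one_even (a : Nat) (h : a % 2 = 0) : Int.land (a : Int) 1 = 0 := by
  have h0 : Int.land (a : Int) 1 = ((a &&& 1 : Nat) : Int) := rfl
  rw [h0, Nat.and_one_is_mod, h]; rfl

theorem land_one_odd (a : Nat) (h : a % 2 = 1) : Int.land (a : Int) 1 = 1 := by
  have h0 : Int.land (a : Int) 1 = ((a &&& 1 : Nat) : Int) := rfl
  rw [h0, Nat.and_one_is_mod, h]; rfl

-- A's first loop computes (s + tz n, n >> tz n)
theorem loopShiftA_spec (n : Nat) : ∀ f s, 0 < n → n ≤ f →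
    loopShiftA f s (n : Int) = (s + (tz n : Int), ((n >>> tz n : Nat) : Int)) := by
  induction n using Nat.strong_induction_on with
  | _ n ih =>
    intro f s hn hf
    obtain ⟨f, rfl⟩ : ∃ f', f = f' + 1 := ⟨f - 1, by omega⟩
    rcases Nat.even_or_odd n with he | ho
    · obtain ⟨k, hk⟩ := he
      have hk2 : n = 2 * k := by omega
      subst hk2
      have hkpos : 0 < k := by omega
      have hl : Int.land ((2 * k : Nat) : Int) 1 = 0 := land_one_even _ (by omega)
      rw [loopShiftA, if_pos ⟨by exact_mod_cast (by omega : (2 * k) ≠ 0), hl⟩]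
      have hsh : (((2 * k : Nat) : Int) >>> (1 : Nat)) = ((k : Nat) : Int) := by
        rw [shiftRight_natCast]
        have : (2 * k) >>> 1 = k := by rw [Nat.shiftRight_one]; omega
        rw [this]
      rw [hsh, ih k (by omega) f (s + 1) hkpos (by omega)]
      have htz : tz (2 * k) = tz k + 1 := by
        rw [tz, if_pos ⟨by omega, by omega⟩]
        have : 2 * k / 2 = k := by omega
        rw [this]
      have hsr : (2 * k) >>> tz (2 * k) = k >>> tz k := by
        rw [htz, Nat.shiftRight_succ_inside]
        have h12 : 2 * k / 2 = k := by omega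
        simp [h12]
      rw [hsr, htz]
      simp only [Prod.mk.injEq]
      constructor
      · push_cast; ring
      · trivial
    · have hm : n % 2 = 1 := Nat.odd_iff.mp ho
      have hl : Int.land (n : Int) 1 = 1 := land_one_odd _ hm
      rw [loopShiftA, if_neg (by rw [hl]; simp)]
      have htz : tz n = 0 := by rw [tz, if_neg]; omega
      simp [htz]

-- A's second loop computes b + tones n
theorem loopBitsA_spec (n : Nat) : ∀ f b, n ≤ f →
    loopBitsA f b (n : Int) = b + (tones n : Int) := by
  induction n using Nat.strong_induction_on with
  | _ n ih =>
    intro f b hf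
    rcases Nat.even_or_odd n with he | ho
    · have hm : n % 2 = 0 := Nat.even_iff.mp he
      have hl : Int.land (n : Int) 1 = 0 := land_one_even _ hm
      have ht : tones n = 0 := by rw [tones, if_neg]; omega
      cases f with
      | zero => simp [loopBitsA, ht]
      | succ f => rw [loopBitsA, if_neg (by simp [hl])]; simp [ht]
    · obtain ⟨k, hk⟩ := ho
      subst hk
      have hl : Int.land ((2 * k + 1 : Nat) : Int) 1 = 1 := land_one_odd _ (by omega)
      obtain ⟨f, rfl⟩ : ∃ f', f = f' + 1 := ⟨f - 1, by omega⟩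
      rw [loopBitsA, if_pos (by rw [hl]; simp)]
      have hsh : (((2 * k + 1 : Nat) : Int) >>> (1 : Nat)) = ((k : Nat) : Int) := by
        rw [shiftRight_natCast]
        have : (2 * k + 1) >>> 1 = k := by rw [Nat.shiftRight_one]; omega
        rw [this]
      rw [hsh, ih k (by omega) f (b + 1) (by omega)]
      have ht : tones (2 * k + 1) = tones k + 1 := by
        rw [tones, if_pos (by omega)]
        have : (2 * k + 1) / 2 = k := by omega
        rw [this]
      rw [ht]; push_cast; ring

theorem main_pos (n : Nat) (hn : 0 < n) :
    mask_shift_and_bits (n : Int) = mask_shift_and_bits_alt (n : Int) := by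
  have hngt : ¬ ((n : Int) ≤ 0) := by exact_mod_cast Nat.not_le.mpr hn
  have hnatAbs : ((n : Int)).natAbs = n := Int.natAbs_natCast n
  -- A side
  have hA1 := loopShiftA_spec n (((n : Int)).natAbs + 1) 0 hn (by rw [hnatAbs]; omega)
  set v : Nat := n >>> tz n with hv
  have hA2 := loopBitsA_spec v (((v : Nat) : Int).natAbs + 1) 0 (by rw [Int.natAbs_natCast]; omega)
  -- B side: shift
  have e1 : (n : Int) - 1 = ((n - 1 : Nat) : Int) := by omega
  have e2 : Int.xor (n : Int) ((n : Int) - 1) = ((n ^^^ (n - 1) : Nat) : Int) := by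
    rw [e1, xor_natCast]
  have e3 : pyBitLength (Int.xor (n : Int) ((n : Int) - 1)) = ((tz n + 1 : Nat) : Int) := by
    rw [e2]; unfold pyBitLength
    rw [Int.natAbs_natCast, xor_pred n hn, size_ones]
  have eshift : pyBitLength (Int.xor (n : Int) ((n : Int) - 1)) - 1 = ((tz n : Nat) : Int) := by
    rw [e3]; push_cast; ring
  have etonat : (((tz n : Nat) : Int)).toNat = tz n := Int.toNat_natCast _
  have evalue : ((n : Int) >>> (tz n : Nat)) = ((v : Nat) : Int) := by
    rw [shiftRight_natCast]
  -- B side: bits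
  have e4 : Int.xor ((v : Nat) : Int) (((v : Nat) : Int) + 1) = ((v ^^^ (v + 1) : Nat) : Int) := by
    have : ((v : Nat) : Int) + 1 = ((v + 1 : Nat) : Int) := by push_cast; ring
    rw [this, xor_natCast]
  have e5 : pyBitLength (Int.xor ((v : Nat) : Int) (((v : Nat) : Int) + 1)) - 1 = ((tones v : Nat) : Int) := by
    rw [e4]; unfold pyBitLength
    rw [Int.natAbs_natCast, xor_succ v, size_ones]; push_cast; ring
  -- assemble
  simp only [mask_shift_and_bits, mask_shift_and_bits_alt, if_neg hngt]
  rw [hA1]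
  simp only [eshift, etonat, evalue, e5]
  rw [hA2]
  simp

-- ===== VERDICT (by name: the statement is the Claim_ definition above) =====
theorem mask_shift_and_bits_spec : Claim_equal_mask_shift_and_bits := by
  intro mask _
  unfold Spec_mask_shift_and_bits
  by_cases h : mask ≤ 0
  · simp [mask_shift_and_bits, mask_shift_and_bits_alt, h]
  · have hm : mask = ((mask.toNat : Nat) : Int) := by omega
    rw [hm]
    exact main_pos mask.toNat (by omega)
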